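-- pv_equiv track=rewrite | github.com/AndrewLishchenko/Main | labs109.py | double_until_all_digits
-- ===== SOURCE A (Python) =====
-- def double_until_all_digits(n, giveup = 1000):
--
--     num=n
--     counter=0
--     numList=list(str(num))
--     result=-1
--
--     for z in range(giveup):
--         numList=list(str(num))
--         for x in range(10):
--             for y in range(len(numList)):
--
--                 if int(numList[y])==counter:
--                     counter+=1
--                     break
--         if counter==10:
--             result=z
--             break
--
--         else:
--             num*=2
--             counter=0
--
--     return(result)
-- ===== SOURCE B (Python) =====
-- def double_until_all_digits(n, giveup=1000):
--     num = n
--     for z in range(giveup):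
--         mask, m = 0, num
--         while m > 0:
--             mask |= 1 << (m % 10)
--             m //= 10
--         if mask == 1023:
--             return z
--         num *= 2
--     return -1
-- ===== Notes on version B (the rewrite author's own statement) =====
-- stated objective: alternative
-- what changed: Replaces A's string conversion plus triple-nested counter-chasing digit scan with pure integer arithmetic: each iteration extracts the digits of num by repeated divmod and accumulates them into a 10-bit mask, succeeding when the mask equals 1023; no str() and no character parsing at all.
-- crash fix: For n < 0 with 1 <= giveup (stated up to giveup <= 100000 so the check is feasible), A raises ValueError (int('-') on the sign character); B's while m > 0 loop never runs, the mask stays 0, and B returns -1 after the doubling loop. — e.g. on double_until_all_digits(-1, 1): A raises ValueError, B returns -1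
import Mathlib
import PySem

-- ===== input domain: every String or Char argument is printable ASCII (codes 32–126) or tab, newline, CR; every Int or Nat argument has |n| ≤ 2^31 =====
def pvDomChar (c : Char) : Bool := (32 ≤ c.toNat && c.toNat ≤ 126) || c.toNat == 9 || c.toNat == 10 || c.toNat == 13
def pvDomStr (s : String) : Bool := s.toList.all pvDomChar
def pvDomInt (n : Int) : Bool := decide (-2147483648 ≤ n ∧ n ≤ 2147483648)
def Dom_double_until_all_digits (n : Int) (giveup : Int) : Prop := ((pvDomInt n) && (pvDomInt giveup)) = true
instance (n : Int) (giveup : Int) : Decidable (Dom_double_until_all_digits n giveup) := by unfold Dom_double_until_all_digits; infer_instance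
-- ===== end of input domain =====

-- B replaces A's string conversion + triple-nested counter-chasing digit scan by pure integer
-- arithmetic: digits extracted by repeated divmod into a 10-bit mask, success when mask = 1023.

-- ===== PORT A =====
-- int(numList[y]) on the 1-character string numList[y]; total form (Pre_ guarantees digits).
def pvCharInt (c : Char) : Int := (PySem.Int.ofChars? [c]).getD 0

-- inner 'for y in range(len(numList)): if int(numList[y])==counter: counter+=1; break'
def pvAInner (cs : List Char) (counter : Int) : Int :=
  match cs with
  | [] => counter
  | c :: rest => if pvCharInt c = counter then counter + 1 else pvAInner rest counter

-- 'for x in range(10):' running the inner scan ten times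
def pvAPasses (k : Nat) (cs : List Char) (counter : Int) : Int :=
  match k with
  | 0 => counter
  | k + 1 => pvAPasses k cs (pvAInner cs counter)

-- 'for z in range(giveup):' with break (result = -1 if the loop never breaks)
def pvALoop (fuel : Nat) (z : Int) (num : Int) : Int :=
  match fuel with
  | 0 => -1
  | fuel + 1 =>
    let numList := (PySem.Int.toStr num).toList
    let counter := pvAPasses 10 numList 0
    if counter = 10 then z else pvALoop fuel (z + 1) (num * 2)

def double_until_all_digits (n : Int) (giveup : Int) : Int :=
  pvALoop giveup.toNat 0 n

-- ===== PORT B =====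
-- 'while m > 0: mask |= 1 << (m % 10); m //= 10'.  The loop only ever sees m ≥ 0 (for a
-- negative m the guard fails at once, in Python and here via .toNat = 0), and on m ≥ 0
-- Python's // and % coincide with Nat division, so the state m is carried as a Nat.
-- structural recursion on an explicit bound f ≥ m (m//10 drops below any f ≥ m ≥ 1)
def pvBMaskGo (f : Nat) (m : Nat) : Nat :=
  match f with
  | 0 => 0
  | f + 1 => if m = 0 then 0 else pvBMaskGo f (m / 10) ||| (1 <<< (m % 10))

def pvBMaskN (m : Nat) : Nat := pvBMaskGo m m

-- 'for z in range(giveup):' with the mask test and early return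
def pvBLoop (fuel : Nat) (z : Int) (num : Int) : Int :=
  match fuel with
  | 0 => -1
  | fuel + 1 =>
    if pvBMaskN num.toNat = 1023 then z else pvBLoop fuel (z + 1) (num * 2)

def double_until_all_digits_alt (n : Int) (giveup : Int) : Int :=
  pvBLoop giveup.toNat 0 n

-- ===== PRECONDITION & SPEC =====
-- A raises ValueError (int('-')) whenever n < 0 and the loop runs at least once.
def Pre_double_until_all_digits (n : Int) (giveup : Int) : Prop := 0 ≤ n ∨ giveup ≤ 0
instance (n : Int) (giveup : Int) : Decidable (Pre_double_until_all_digits n giveup) := by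
  unfold Pre_double_until_all_digits; infer_instance

def pvWitness_double_until_all_digits : Int × Int := (1234567890, 3)

-- For n < 0 with giveup >= 1, A raises ValueError (int('-') on the sign character); B's
-- 'while m > 0' loop never runs, the mask stays 0, and B returns -1 after the doubling loop
-- (region stated up to giveup ≤ 100000 so that B's run there is feasible to check).
def Raises_double_until_all_digits (n : Int) (giveup : Int) : Prop := n < 0 ∧ 1 ≤ giveup ∧ giveup ≤ 100000
instance (n : Int) (giveup : Int) : Decidable (Raises_double_until_all_digits n giveup) := by
  unfold Raises_double_until_all_digits; infer_instance

def pvRaiseWitness_double_until_all_digits : Int × Int := (-1, 1)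
def pvRaiseWitnessOut_double_until_all_digits : Int := -1

def Spec_double_until_all_digits (n : Int) (giveup : Int) (out : Int) : Prop := out = double_until_all_digits_alt n giveup
instance (n : Int) (giveup : Int) (out : Int) : Decidable (Spec_double_until_all_digits n giveup out) := by unfold Spec_double_until_all_digits; infer_instance

-- ===== CLAIM (what is proved, stated in full; the proofs are below) =====
def Claim_equal_double_until_all_digits : Prop := ∀ (n : Int) (giveup : Int), Dom_double_until_all_digits n giveup → Pre_double_until_all_digits n giveup → Spec_double_until_all_digits n giveup (double_until_all_digits n giveup)

def Claim_raises_double_until_all_digits : Prop := (∀ (n : Int) (giveup : Int), Dom_double_until_all_digits n giveup → Raises_double_until_all_digits n giveup → ¬ Pre_double_until_all_digits n giveup) ∧ (Dom_double_until_all_digits (pvRaiseWitness_double_until_all_digits.1) (pvRaiseWitness_double_until_all_digits.2) ∧ Raises_double_until_all_digits (pvRaiseWitness_double_until_all_digits.1) (pvRaiseWitness_double_until_all_digits.2) ∧ double_until_all_digits_alt (pvRaiseWitness_double_until_all_digits.1) (pvRaiseWitness_double_until_all_digits.2) = pvRaiseWitnessOut_double_until_all_digits)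

-- ===== LEMMAS AND PROOFS =====

lemma pvBMaskGo_congr : ∀ (f f' m : Nat), m ≤ f → m ≤ f' → pvBMaskGo f m = pvBMaskGo f' m := by
  intro f
  induction f with
  | zero =>
    intro f' m hf hf'
    have : m = 0 := by omega
    subst this
    cases f' <;> simp [pvBMaskGo]
  | succ f ih =>
    intro f' m hf hf'
    cases f' with
    | zero =>
      have : m = 0 := by omega
      subst this
      simp [pvBMaskGo]
    | succ f' =>
      simp only [pvBMaskGo]
      by_cases h : m = 0
      · simp [h]
      · rw [if_neg h, if_neg h,
          ih f' (m / 10) (by omega) (by omega)]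

-- the defining recurrence of B's digit mask
lemma pvBMaskN_eq (m : Nat) :
    pvBMaskN m = if m = 0 then 0 else pvBMaskN (m / 10) ||| (1 <<< (m % 10)) := by
  cases m with
  | zero => simp [pvBMaskN, pvBMaskGo]
  | succ k =>
    show pvBMaskGo (k + 1) (k + 1) = _
    rw [if_neg (Nat.succ_ne_zero k)]
    simp only [pvBMaskGo, if_neg (Nat.succ_ne_zero k)]
    rw [pvBMaskGo_congr k ((k + 1) / 10) ((k + 1) / 10) (by omega) le_rfl]
    rfl

-- 'digit value j occurs in the char list' (as A's inner scan tests it)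
def pvHasValB (cs : List Char) (v : Int) : Bool := cs.any (fun c => pvCharInt c == v)

lemma pvAInner_eq (cs : List Char) (k : Int) :
    pvAInner cs k = if pvHasValB cs k then k + 1 else k := by
  induction cs with
  | nil => simp [pvAInner, pvHasValB]
  | cons c rest ih =>
    by_cases h : pvCharInt c = k
    · simp [pvAInner, pvHasValB, h]
    · simp [pvAInner, pvHasValB, List.any_cons, h] at ih ⊢
      exact ih

lemma pvAPasses_full (cs : List Char) : ∀ (k : Nat) (c : Int),
    (∀ j : Int, c ≤ j → j < c + k → pvHasValB cs j = true) → pvAPasses k cs c = c + k := by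
  intro k
  induction k with
  | zero => intro c _; simp [pvAPasses]
  | succ k ih =>
    intro c h
    have hc : pvHasValB cs c = true := h c le_rfl (by omega)
    show pvAPasses k cs (pvAInner cs c) = c + (k + 1)
    rw [pvAInner_eq, if_pos hc, ih (c + 1) (fun j h1 h2 => h j (by omega) (by omega))]
    omega

lemma pvAPasses_stuck (cs : List Char) (j : Int) (hj : pvHasValB cs j = false) :
    ∀ (k : Nat) (c : Int), c ≤ j → pvAPasses k cs c ≤ j := by
  intro k
  induction k with
  | zero => intro c hc; simpa [pvAPasses] using hc
  | succ k ih =>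
    intro c hc
    show pvAPasses k cs (pvAInner cs c) ≤ j
    rw [pvAInner_eq]
    by_cases h : pvHasValB cs c = true
    · rw [if_pos h]
      refine ih (c + 1) ?_
      rcases eq_or_lt_of_le hc with rfl | hlt
      · rw [h] at hj; cases hj
      · omega
    · rw [if_neg h]; exact ih c hc

-- A's ten passes reach 10 exactly when every digit value 0..9 occurs.
lemma pvAPasses_iff (cs : List Char) :
    pvAPasses 10 cs 0 = 10 ↔ ∀ j : Int, 0 ≤ j → j < 10 → pvHasValB cs j = true := by
  constructor
  · intro h j h0 h10
    by_contra hj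
    have := pvAPasses_stuck cs j (by simpa using hj) 10 0 h0
    omega
  · intro h
    simpa using pvAPasses_full cs 10 0 (fun j h1 h2 => h j h1 (by omega))

lemma pvCharInt_digitChar (d : Nat) (hd : d < 10) : pvCharInt (Nat.digitChar d) = (d : Int) := by
  interval_cases d <;> decide

lemma pvBMaskN_testBit_lt (m : Nat) : ∀ j : Nat, (pvBMaskN m).testBit j = true → j < 10 := by
  induction m using Nat.strong_induction_on with
  | _ m ih =>
    intro j hj
    rw [pvBMaskN_eq] at hj
    by_cases h : m = 0
    · rw [if_pos h] at hj; simp [Nat.testBit] at hj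
    · rw [if_neg h, Nat.testBit_or, Nat.shiftLeft_eq, one_mul, Nat.testBit_two_pow] at hj
      rcases Bool.or_eq_true_iff.1 hj with h1 | h1
      · exact ih (m / 10) (Nat.div_lt_self (Nat.pos_of_ne_zero h) (by norm_num)) j h1
      · have : m % 10 = j := of_decide_eq_true h1
        omega

-- the mask's bit j records exactly whether digitChar j appears among the produced chars
lemma pvToDigitsCore_hasVal (f : Nat) : ∀ (m : Nat) (acc : List Char), 1 ≤ m → m < 10 ^ f →
    ∀ j : Nat, j < 10 →
    (pvHasValB (Nat.toDigitsCore 10 f m acc) (j : Int) =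
      (pvHasValB acc (j : Int) || (pvBMaskN m).testBit j)) := by
  induction f with
  | zero => intro m acc h1 h2 j hj; omega
  | succ f ih =>
    intro m acc h1 h2 j hj
    have hmask : pvBMaskN m = pvBMaskN (m / 10) ||| (1 <<< (m % 10)) := by
      rw [pvBMaskN_eq, if_neg (by omega)]
    have hbit : (1 <<< (m % 10)).testBit j = decide (m % 10 = j) := by
      rw [Nat.shiftLeft_eq, one_mul, Nat.testBit_two_pow]
    have hcons : pvHasValB (Nat.digitChar (m % 10) :: acc) (j : Int) =
        (decide (m % 10 = j) || pvHasValB acc (j : Int)) := by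
      by_cases hmj : m % 10 = j
      · simp [pvHasValB, List.any_cons, hmj]
        exact Or.inl (pvCharInt_digitChar j hj)
      · have hne : pvCharInt (Nat.digitChar (m % 10)) ≠ (j : Int) := by
          rw [pvCharInt_digitChar (m % 10) (Nat.mod_lt _ (by norm_num))]
          omega
        simp [pvHasValB, List.any_cons, hne, hmj]
    simp only [Nat.toDigitsCore]
    by_cases h : m / 10 = 0
    · rw [if_pos h, hcons, hmask, h]
      have h0 : pvBMaskN 0 = 0 := by rw [pvBMaskN_eq]; simp
      rw [h0, Nat.testBit_or, hbit]
      simp [Nat.testBit, Bool.or_comm]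
    · rw [if_neg h]
      have hlt : m / 10 < 10 ^ f := by
        have hp : m < 10 ^ f * 10 := by
          calc m < 10 ^ (f + 1) := h2
          _ = 10 ^ f * 10 := by ring
        omega
      rw [ih (m / 10) _ (Nat.pos_of_ne_zero h) hlt j hj, hcons, hmask, Nat.testBit_or, hbit]
      cases hb : pvHasValB acc (j : Int) <;> cases hd : decide (m % 10 = j) <;>
        simp

-- the full mask 1023 means each bit 0..9 is set
lemma pvMask_eq_1023 (mask : Nat) (hlt : ∀ j : Nat, mask.testBit j = true → j < 10) :
    mask = 1023 ↔ ∀ j : Nat, j < 10 → mask.testBit j = true := by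
  constructor
  · rintro rfl j hj
    interval_cases j <;> decide
  · intro h
    apply Nat.eq_of_testBit_eq
    intro j
    by_cases hj : j < 10
    · rw [h j hj]
      interval_cases j <;> decide
    · have h1 : mask.testBit j = false := by
        cases hb : mask.testBit j
        · rfl
        · exact absurd (hlt j hb) hj
      have h2 : (1023 : Nat).testBit j = false := by
        apply Nat.testBit_lt_two_pow
        calc (1023 : Nat) < 2 ^ 10 := by norm_num
        _ ≤ 2 ^ j := Nat.pow_le_pow_right (by norm_num) (by omega)
      rw [h1, h2]

-- str(num) for num ≥ 1 is Nat.toDigits 10 num.toNat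
lemma pvToChars_pos (num : Int) (h : 1 ≤ num) :
    (PySem.Int.toStr num).toList = Nat.toDigitsCore 10 (num.toNat + 1) num.toNat [] := by
  rw [PySem.Int.toList_toStr]
  unfold PySem.Int.toChars
  rw [if_neg (by omega)]
  rfl

-- the key step equivalence for positive num
lemma pvKey (num : Int) (h : 1 ≤ num) :
    (pvAPasses 10 (PySem.Int.toStr num).toList 0 = 10) ↔ pvBMaskN num.toNat = 1023 := by
  have hfuel : num.toNat < 10 ^ (num.toNat + 1) := by
    calc num.toNat < 2 ^ num.toNat := Nat.lt_two_pow_self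
    _ ≤ 2 ^ (num.toNat + 1) := Nat.pow_le_pow_right (by norm_num) (by omega)
    _ ≤ 10 ^ (num.toNat + 1) := Nat.pow_le_pow_left (by norm_num) _
  rw [pvToChars_pos num h, pvAPasses_iff,
    pvMask_eq_1023 _ (pvBMaskN_testBit_lt num.toNat)]
  constructor
  · intro hall j hj
    have := hall (j : Int) (by omega) (by omega)
    rw [pvToDigitsCore_hasVal _ num.toNat [] (by omega) hfuel j hj] at this
    simpa [pvHasValB] using this
  · intro hall j h0 h10
    have hj : j.toNat < 10 := by omega
    have hjc : (j.toNat : Int) = j := by omega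
    rw [← hjc, pvToDigitsCore_hasVal _ num.toNat [] (by omega) hfuel j.toNat hj]
    simp [pvHasValB, hall j.toNat hj]

-- num = 0 never succeeds on either side and stays 0
lemma pvLoop_zero : ∀ (fuel : Nat) (z : Int), pvALoop fuel z 0 = pvBLoop fuel z 0 := by
  intro fuel
  induction fuel with
  | zero => intro z; rfl
  | succ fuel ih =>
    intro z
    simp only [pvALoop, pvBLoop]
    have hA : pvAPasses 10 (PySem.Int.toStr 0).toList 0 = 1 := by decide
    have hB : pvBMaskN (0 : Int).toNat = 0 := by decide
    rw [hA, hB]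
    simpa using ih (z + 1)

lemma pvLoop_eq : ∀ (fuel : Nat) (z num : Int), 0 ≤ num →
    pvALoop fuel z num = pvBLoop fuel z num := by
  intro fuel
  induction fuel with
  | zero => intro z num _; rfl
  | succ fuel ih =>
    intro z num hnum
    rcases eq_or_lt_of_le hnum with rfl | hpos
    · exact pvLoop_zero (fuel + 1) z
    · simp only [pvALoop, pvBLoop]
      by_cases h : pvBMaskN num.toNat = 1023
      · rw [if_pos ((pvKey num hpos).2 h), if_pos h]
      · rw [if_neg (fun hc => h ((pvKey num hpos).1 hc)), if_neg h,
          ih (z + 1) (num * 2) (by omega)]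

-- ===== VERDICT (by name: the statement is the Claim_ definition above) =====
theorem double_until_all_digits_spec : Claim_equal_double_until_all_digits := by
  intro n giveup _ hpre
  unfold Spec_double_until_all_digits double_until_all_digits double_until_all_digits_alt
  rcases hpre with h | h
  · exact pvLoop_eq _ 0 n h
  · rw [Int.toNat_of_nonpos h]; rfl

theorem double_until_all_digits_raises : Claim_raises_double_until_all_digits := by
  unfold Claim_raises_double_until_all_digits
  constructor
  · intro n giveup _ hr hp
    unfold Raises_double_until_all_digits at hr
    unfold Pre_double_until_all_digits at hp
    omega
  · exact ⟨by decide, by decide, by decide⟩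

-- self-check: the raises witness value is exactly what the claim records
lemma pvRaises_selfcheck_ok :
    double_until_all_digits_alt pvRaiseWitness_double_until_all_digits.1
      pvRaiseWitness_double_until_all_digits.2 = pvRaiseWitnessOut_double_until_all_digits :=
  double_until_all_digits_raises.2.2.2
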